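-- pv_equiv track=rewrite | github.com/nesl/LanguageCE | ce_builder.py | gen_combinations
-- ===== SOURCE A (Python) =====
-- import itertools
--
-- def gen_combinations(attribute_values, times):
--
--     # First, we must note the order: Is time increasing?  Are the attribute values increasing?
--     time_ascending = times[0] < times[1]
--     min_time = min(times)
--     attributes_ascending = attribute_values[0] < attribute_values[1]
--
--     # Next, figure out all subsets of those attribute values
--     smallest_attribute_value = min(attribute_values)
--     largest_attribute_value = max(attribute_values)
--     # First, get all possible values (e.g. treat attribute_values as a range)
--     new_possible_values = [i for i in range(smallest_attribute_value, largest_attribute_value+1)]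
--
--     possible_combinations = []
--     # Now, get all possible combos which contain both values
--     for L in range(len(new_possible_values) + 1):
--         for subset in itertools.combinations(new_possible_values, L):
--             # Make sure we have both values in it
--             if smallest_attribute_value in subset and largest_attribute_value in subset:
--                 possible_combinations.append(list(subset))
--
--     # Now, we have to make sure our times and our attributes follow the same order
--     #  as when we had read them in
--     results = []
--     for combo in possible_combinations:
--         # Generate the time in order
--         current_times = [x for x in range(min_time, min_time+len(combo))]
--         if not time_ascending:
--             current_times.sort(reverse=True)
--
--         # Generate the combinations in order
--         combo.sort()
--         if not attributes_ascending:
--             combo.sort(reverse=True)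
--
--         results.append((current_times, combo))
--
--     return results
-- ===== SOURCE B (Python) =====
-- def gen_combinations(attribute_values, times):
--     # Build the valid subsets directly by a right-to-left DP over the interior
--     # values (buckets by size, in lexicographic order), instead of enumerating
--     # and filtering all 2^n subsets of the full range.
--     time_ascending = times[0] < times[1]
--     min_time = min(times)
--     attributes_ascending = attribute_values[0] < attribute_values[1]
--     lo, hi = min(attribute_values), max(attribute_values)
--
--     if lo == hi:
--         combos = [[lo]]
--     else:
--         # by_size[L] = size-L subsets of the suffix processed so far, lex order
--         by_size = [[[]]]
--         for v in reversed(range(lo + 1, hi)):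
--             grown = [[[v] + c for c in bucket] for bucket in by_size]
--             by_size = [by_size[0]] + [g + old for g, old in zip(grown, by_size[1:] + [[]])]
--         combos = [[lo] + mid + [hi] for bucket in by_size for mid in bucket]
--
--     results = []
--     for combo in combos:
--         if time_ascending:
--             cur = list(range(min_time, min_time + len(combo)))
--         else:
--             cur = list(range(min_time + len(combo) - 1, min_time - 1, -1))
--         results.append((cur, combo if attributes_ascending else combo[::-1]))
--     return results
-- ===== Notes on version B (the rewrite author's own statement) =====
-- stated objective: alternative
-- what changed: B replaces A's enumerate-all-2^n-subsets-and-filter with a size-bucketed dynamic program over the interior values (prepending each value right-to-left), so only the kept subsets are ever built, and it emits time lists as a descending range directly instead of reverse-sorting an ascending one.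
import Mathlib
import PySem

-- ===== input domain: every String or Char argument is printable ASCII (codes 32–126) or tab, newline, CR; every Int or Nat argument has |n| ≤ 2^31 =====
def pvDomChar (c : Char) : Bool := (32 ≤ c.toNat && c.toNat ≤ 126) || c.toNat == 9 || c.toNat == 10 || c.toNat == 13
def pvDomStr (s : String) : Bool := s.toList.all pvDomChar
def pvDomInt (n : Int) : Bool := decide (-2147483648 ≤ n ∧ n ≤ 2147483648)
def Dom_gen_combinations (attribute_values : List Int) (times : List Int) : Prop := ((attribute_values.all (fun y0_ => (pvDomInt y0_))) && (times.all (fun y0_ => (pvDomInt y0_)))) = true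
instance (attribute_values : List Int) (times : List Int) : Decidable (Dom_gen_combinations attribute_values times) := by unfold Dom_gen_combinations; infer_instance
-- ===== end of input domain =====

-- B builds the valid subsets directly by a size-bucketed DP over the interior values
-- (right-to-left, lexicographic order) instead of filtering all subsets of the full range.


-- ===== PORT A =====
-- itertools.combinations(xs, n) in Python's lexicographic order (A-side helper)
def pyCombinations : List Int → Nat → List (List Int)
  | _, 0 => [[]]
  | [], _ + 1 => []
  | x :: xs, n + 1 => ((pyCombinations xs n).map (fun s => x :: s)) ++ pyCombinations xs (n + 1)

def gen_combinations (attribute_values : List Int) (times : List Int) : List (List Int × List Int) :=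
  let time_ascending : Bool := decide (PySem.List.pyGetD times 0 0 < PySem.List.pyGetD times 1 0)
  let min_time : Int := (PySem.List.min? times (fun x => x)).getD 0
  let attributes_ascending : Bool :=
    decide (PySem.List.pyGetD attribute_values 0 0 < PySem.List.pyGetD attribute_values 1 0)
  let smallest : Int := (PySem.List.min? attribute_values (fun x => x)).getD 0
  let largest : Int := (PySem.List.max? attribute_values (fun x => x)).getD 0
  let new_possible_values := PySem.List.pyRange smallest (largest + 1) 1
  let possible_combinations :=
    (List.range (new_possible_values.length + 1)).foldl (fun acc L =>
      (pyCombinations new_possible_values L).foldl (fun acc2 subset =>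
        if subset.contains smallest && subset.contains largest then acc2 ++ [subset] else acc2)
        acc) []
  possible_combinations.foldl (fun results combo =>
    let current_times := PySem.List.pyRange min_time (min_time + (combo.length : Int)) 1
    let current_times := if time_ascending then current_times
                         else PySem.List.sorted current_times (fun x => x) true
    let combo2 := PySem.List.sorted combo (fun x => x)
    let combo3 := if attributes_ascending then combo2
                  else PySem.List.sorted combo2 (fun x => x) true
    results ++ [(current_times, combo3)]) []

-- ===== PORT B =====
-- one DP step: prepend v to every subset in every bucket and merge into the next-size bucket
def dpStep (v : Int) (bs : List (List (List Int))) : List (List (List Int)) :=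
  match bs with
  | [] => []
  | b0 :: rest =>
    let grown := (b0 :: rest).map (fun bucket => bucket.map (fun c => v :: c))
    b0 :: (List.zip grown (rest ++ [[]])).map (fun p => p.1 ++ p.2)

def gen_combinations_alt (attribute_values : List Int) (times : List Int) : List (List Int × List Int) :=
  let time_ascending : Bool := decide (PySem.List.pyGetD times 0 0 < PySem.List.pyGetD times 1 0)
  let min_time : Int := (PySem.List.min? times (fun x => x)).getD 0
  let attributes_ascending : Bool :=
    decide (PySem.List.pyGetD attribute_values 0 0 < PySem.List.pyGetD attribute_values 1 0)
  let lo : Int := (PySem.List.min? attribute_values (fun x => x)).getD 0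
  let hi : Int := (PySem.List.max? attribute_values (fun x => x)).getD 0
  let combos : List (List Int) :=
    if lo == hi then [[lo]]
    else
      let by_size := ((PySem.List.pyRange (lo + 1) hi 1).reverse).foldl
        (fun bs v => dpStep v bs) [[([] : List Int)]]
      by_size.flatMap (fun bucket => bucket.map (fun mid => lo :: (mid ++ [hi])))
  combos.map (fun combo =>
    ((if time_ascending then PySem.List.pyRange min_time (min_time + (combo.length : Int)) 1
      else PySem.List.pyRange (min_time + (combo.length : Int) - 1) (min_time - 1) (-1)),
     (if attributes_ascending then combo else combo.reverse)))

-- ===== PRECONDITION & SPEC =====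
-- A indexes times[1] and attribute_values[1]: it raises IndexError unless both lists have length ≥ 2.
def Pre_gen_combinations (attribute_values : List Int) (times : List Int) : Prop :=
  2 ≤ attribute_values.length ∧ 2 ≤ times.length
instance (attribute_values : List Int) (times : List Int) : Decidable (Pre_gen_combinations attribute_values times) := by unfold Pre_gen_combinations; infer_instance
def pvWitness_gen_combinations : List Int × List Int := ([3, 1], [10, 11])
def Spec_gen_combinations (attribute_values : List Int) (times : List Int) (out : List (List Int × List Int)) : Prop := out = gen_combinations_alt attribute_values times
instance (attribute_values : List Int) (times : List Int) (out : List (List Int × List Int)) : Decidable (Spec_gen_combinations attribute_values times out) := by unfold Spec_gen_combinations; infer_instance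

-- ===== CLAIM (what is proved, stated in full; the proofs are below) =====
def Claim_equal_gen_combinations : Prop := ∀ (attribute_values : List Int) (times : List Int), Dom_gen_combinations attribute_values times → Pre_gen_combinations attribute_values times → Spec_gen_combinations attribute_values times (gen_combinations attribute_values times)

-- ===== LEMMAS AND PROOFS =====

-- every member of pyCombinations xs n is a sublist of xs
theorem pyCombinations_sublist (xs : List Int) : ∀ (n : Nat) (s : List Int),
    s ∈ pyCombinations xs n → s.Sublist xs := by
  induction xs with
  | nil =>
    intro n s hs
    cases n with
    | zero => simp [pyCombinations] at hs; simp [hs]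
    | succ n => simp [pyCombinations] at hs
  | cons x xs ih =>
    intro n s hs
    cases n with
    | zero => simp [pyCombinations] at hs; simp [hs]
    | succ n =>
      simp only [pyCombinations, List.mem_append, List.mem_map] at hs
      rcases hs with ⟨t, ht, rfl⟩ | hs
      · exact (ih n t ht).cons₂ x
      · exact (ih (n + 1) s hs).cons x

-- combinations of size 1 are the singletons
theorem pyCombinations_one (xs : List Int) : pyCombinations xs 1 = xs.map (fun x => [x]) := by
  induction xs with
  | nil => rfl
  | cons x xs ih => simp [pyCombinations, ih]

-- too-large sizes give no combinations
theorem pyCombinations_eq_nil (xs : List Int) : ∀ (n : Nat), xs.length < n →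
    pyCombinations xs n = [] := by
  induction xs with
  | nil => intro n hn; cases n with
    | zero => omega
    | succ n => rfl
  | cons x xs ih =>
    intro n hn
    cases n with
    | zero => omega
    | succ n =>
      simp only [pyCombinations, List.append_eq_nil_iff, List.map_eq_nil_iff]
      constructor
      · exact ih n (by simp at hn; omega)
      · exact ih (n + 1) (by simp at hn; omega)

-- one DP step turns the bucket table of s into the bucket table of v :: s
theorem dpStep_eq (v : Int) (s : List Int) :
    dpStep v ((List.range (s.length + 1)).map (fun L => pyCombinations s L))
      = (List.range (s.length + 2)).map (fun L => pyCombinations (v :: s) L) := by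
  set n := s.length with hn
  have hsplit : (List.range (n + 1)).map (fun L => pyCombinations s L)
      = pyCombinations s 0 :: (List.range n).map (fun L => pyCombinations s (L + 1)) := by
    rw [List.range_succ_eq_map, List.map_cons, List.map_map]; rfl
  rw [hsplit]
  unfold dpStep
  simp only []
  have hrest : (List.range n).map (fun L => pyCombinations s (L + 1)) ++ [[]]
      = (List.range (n + 1)).map (fun L => pyCombinations s (L + 1)) := by
    rw [List.range_succ, List.map_append, List.map_singleton,
      pyCombinations_eq_nil s (n + 1) (by omega)]
  have hgrown : (pyCombinations s 0 :: (List.range n).map (fun L => pyCombinations s (L + 1))).map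
        (fun bucket => bucket.map (fun c => v :: c))
      = (List.range (n + 1)).map (fun L => (pyCombinations s L).map (fun c => v :: c)) := by
    rw [← hsplit, List.map_map]
    rfl
  rw [hgrown, hrest, List.zip_map', List.map_map]
  rw [show List.range (n + 2) = 0 :: List.map Nat.succ (List.range (n + 1)) from
    List.range_succ_eq_map, List.map_cons, List.map_map]
  congr 1
  simp [pyCombinations]

-- folding dpStep over the reversed list builds the full bucket table
theorem dp_fold (xs : List Int) :
    (xs.reverse).foldl (fun bs v => dpStep v bs) [[([] : List Int)]]
      = (List.range (xs.length + 1)).map (fun L => pyCombinations xs L) := by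
  rw [List.foldl_reverse]
  induction xs with
  | nil => rfl
  | cons v s ih =>
    rw [List.foldr_cons, ih]
    exact dpStep_eq v s

-- strictly ascending lists: Python's sort is the identity, reverse-sort is reverse
theorem sorted_eq_self_of_lt (l : List Int) (h : l.Pairwise (· < ·)) :
    PySem.List.sorted l (fun x => x) = l :=
  PySem.List.sorted_eq_self_of_pairwise l _ (h.imp le_of_lt)

theorem sorted_rev_eq_reverse_of_lt (l : List Int) (h : l.Pairwise (· < ·)) :
    PySem.List.sorted l (fun x => x) true = l.reverse :=
  PySem.List.sorted_rev_eq_of_perm_of_pairwise_gt l l.reverse _ l.reverse_perm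
    (by simpa [List.pairwise_reverse] using h)

-- pulling a trailing element z ∉ ys out of the filtered combinations
theorem pyCombinations_filter_last (z : Int) : ∀ (ys : List Int), z ∉ ys → ∀ (n : Nat),
    (pyCombinations (ys ++ [z]) (n + 1)).filter (fun s => s.contains z)
      = (pyCombinations ys n).map (fun s => s ++ [z]) := by
  intro ys
  induction ys with
  | nil =>
    intro _ n
    cases n with
    | zero => simp [pyCombinations]
    | succ n => simp [pyCombinations, pyCombinations_eq_nil]
  | cons y ys ih =>
    intro hz n
    have hy : y ≠ z := by intro h; exact hz (h ▸ List.mem_cons_self)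
    have hz' : z ∉ ys := fun h => hz (List.mem_cons_of_mem _ h)
    have key : ∀ m, (pyCombinations ((y :: ys) ++ [z]) (m + 1)).filter (fun s => s.contains z)
        = ((pyCombinations (ys ++ [z]) m).filter (fun s => s.contains z)).map (fun s => y :: s)
          ++ (pyCombinations ys m).map (fun s => s ++ [z]) := by
      intro m
      simp only [List.cons_append, pyCombinations, List.filter_append, List.filter_map]
      congr 1
      · rw [List.filter_congr (fun s _ => by
          show ((fun s => s.contains z) ∘ fun s => y :: s) s = (fun s => s.contains z) s
          simp [hy.symm])]
      · exact ih hz' m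
    cases n with
    | zero =>
      rw [key 0]
      simp [pyCombinations]
    | succ n =>
      rw [key (n + 1), ih hz' n]
      simp only [pyCombinations, List.map_append, List.map_map]
      rfl

-- filtered combinations of lo :: rest for both endpoints, lo ∉ rest, lo ≠ hi
theorem pyCombinations_filter_cons (lo hi : Int) (rest : List Int) (hlo : lo ∉ rest)
    (hne : lo ≠ hi) (n : Nat) :
    (pyCombinations (lo :: rest) (n + 2)).filter (fun s => s.contains lo && s.contains hi)
      = ((pyCombinations rest (n + 1)).filter (fun s => s.contains hi)).map (fun s => lo :: s) := by
  simp only [pyCombinations, List.filter_append, List.filter_map]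
  have h2 : (pyCombinations rest (n + 2)).filter
      (fun s => s.contains lo && s.contains hi) = [] := by
    apply List.filter_eq_nil_iff.mpr
    intro s hs
    have : lo ∉ s := fun h => hlo ((pyCombinations_sublist rest (n + 2) s hs).mem h)
    simp [List.contains_eq_mem, this]
  rw [h2, List.append_nil]
  congr 1
  rw [List.filter_congr (fun s _ => by
    show ((fun s => s.contains lo && s.contains hi) ∘ fun s => lo :: s) s
        = (fun s => s.contains hi) s
    simp [Ne.symm hne])]

-- members of the DP's combo list (lo < hi case) are strictly ascending
theorem combo_pairwise (lo hi : Int) (hlt : lo < hi) (m : List Int)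
    (hm : m.Sublist (PySem.List.pyRange (lo + 1) hi 1)) :
    (lo :: (m ++ [hi])).Pairwise (· < ·) := by
  have hmem : ∀ x ∈ m, lo + 1 ≤ x ∧ x < hi := by
    intro x hx
    exact (PySem.List.mem_pyRange_one).mp (hm.mem hx)
  have hpw : m.Pairwise (· < ·) := (PySem.List.pairwise_lt_pyRange_one _ _).sublist hm
  simp only [List.pairwise_cons, List.pairwise_append, List.mem_append, List.mem_singleton]
  refine ⟨?_, hpw, ?_, ?_⟩
  · rintro a (ha | rfl)
    · exact lt_of_lt_of_le (by omega) (hmem a ha).1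
    · exact hlt
  · simp
  · intro a ha b hb
    subst hb
    exact (hmem a ha).2

theorem gen_combinations_eq (attribute_values times : List Int)
    (hp : Pre_gen_combinations attribute_values times) :
    gen_combinations attribute_values times = gen_combinations_alt attribute_values times := by
  obtain ⟨ha, ht⟩ := hp
  unfold gen_combinations gen_combinations_alt
  simp only []
  have hane : attribute_values ≠ [] := by intro h; simp [h] at ha
  set lo := (PySem.List.min? attribute_values (fun x => x)).getD 0 with hlo
  set hi := (PySem.List.max? attribute_values (fun x => x)).getD 0 with hhi
  set min_time := (PySem.List.min? times (fun x => x)).getD 0 with hmt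
  set tasc := decide (PySem.List.pyGetD times 0 0 < PySem.List.pyGetD times 1 0) with htasc
  set aasc := decide (PySem.List.pyGetD attribute_values 0 0 < PySem.List.pyGetD attribute_values 1 0) with haasc
  clear_value lo hi min_time tasc aasc
  -- lo ≤ hi
  have hmn' : PySem.List.min? attribute_values (fun x => x) ≠ none :=
    fun h => hane ((PySem.List.min?_eq_none_iff _ _).mp h)
  have hmx' : PySem.List.max? attribute_values (fun x => x) ≠ none :=
    fun h => hane ((PySem.List.max?_eq_none_iff _ _).mp h)
  obtain ⟨mn, hmn⟩ := Option.ne_none_iff_exists'.mp hmn'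
  obtain ⟨mx, hmx⟩ := Option.ne_none_iff_exists'.mp hmx'
  have hlohi : lo ≤ hi := by
    have h1 := PySem.List.max?_isMax hmx mn (PySem.List.min?_mem hmn)
    rw [hlo, hhi, hmn, hmx]
    simpa using h1
  -- B's DP bucket table is the table of lexicographic combinations
  have hdp : ((PySem.List.pyRange (lo + 1) hi 1).reverse).foldl (fun bs v => dpStep v bs)
        [[([] : List Int)]]
      = (List.range ((PySem.List.pyRange (lo + 1) hi 1).length + 1)).map
          (fun L => pyCombinations (PySem.List.pyRange (lo + 1) hi 1) L) :=
    dp_fold _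
  -- the combo lists coincide
  have hcombos :
      (List.range ((PySem.List.pyRange lo (hi + 1) 1).length + 1)).foldl (fun acc L =>
        (pyCombinations (PySem.List.pyRange lo (hi + 1) 1) L).foldl (fun acc2 subset =>
          if subset.contains lo && subset.contains hi then acc2 ++ [subset] else acc2) acc) []
      = (if lo == hi then [[lo]]
         else (((PySem.List.pyRange (lo + 1) hi 1).reverse).foldl (fun bs v => dpStep v bs)
             [[([] : List Int)]]).flatMap
           (fun bucket => bucket.map (fun mid => lo :: (mid ++ [hi])))) := by
    have hfold : ∀ (ls : List Nat),
        ls.foldl (fun acc L =>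
          (pyCombinations (PySem.List.pyRange lo (hi + 1) 1) L).foldl (fun acc2 subset =>
            if subset.contains lo && subset.contains hi then acc2 ++ [subset] else acc2) acc) []
        = ls.flatMap (fun L => (pyCombinations (PySem.List.pyRange lo (hi + 1) 1) L).filter
            (fun subset => subset.contains lo && subset.contains hi)) := by
      intro ls
      rw [show (fun acc L =>
          (pyCombinations (PySem.List.pyRange lo (hi + 1) 1) L).foldl (fun acc2 subset =>
            if subset.contains lo && subset.contains hi then acc2 ++ [subset] else acc2) acc)
        = (fun acc L => acc ++ (pyCombinations (PySem.List.pyRange lo (hi + 1) 1) L).filter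
            (fun subset => subset.contains lo && subset.contains hi)) from ?_]
      · rw [PySem.List.foldl_append_eq_flatMap]; rfl
      · funext acc L
        exact PySem.List.foldl_append_if_eq_filter _ _ acc
    rw [hfold, hdp, List.flatMap_map]
    by_cases heq : lo = hi
    · subst heq
      simp only [BEq.rfl, if_true]
      rw [show PySem.List.pyRange lo (lo + 1) 1 = [lo] from PySem.List.pyRange_one_singleton lo]
      norm_num [List.range_succ_eq_map]
      rw [pyCombinations_one]
      simp [pyCombinations]
    · have hlt : lo < hi := lt_of_le_of_ne hlohi heq
      simp only [beq_iff_eq, heq, if_false]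
      -- split the full range as lo :: interior ++ [hi]
      set interior := PySem.List.pyRange (lo + 1) hi 1 with hint
      have hsplit : PySem.List.pyRange lo (hi + 1) 1 = lo :: (interior ++ [hi]) := by
        rw [PySem.List.pyRange_one_cons (by omega), PySem.List.pyRange_one_succ_right (by omega)]
      have hlen : (PySem.List.pyRange lo (hi + 1) 1).length = interior.length + 2 := by
        rw [hsplit]; simp
      have hlomem : lo ∉ interior ++ [hi] := by
        simp only [List.mem_append, List.mem_singleton]
        rintro (h | rfl)
        · have := (PySem.List.mem_pyRange_one).mp h; omega
        · omega
      have hhimem : hi ∉ interior := by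
        intro h; have := (PySem.List.mem_pyRange_one).mp h; omega
      rw [hlen, hsplit]
      rw [List.range_succ_eq_map, List.range_succ_eq_map, List.map_cons, List.flatMap_cons,
        List.flatMap_cons, List.map_map, List.flatMap_map]
      have h0 : (pyCombinations (lo :: (interior ++ [hi])) 0).filter
          (fun s => s.contains lo && s.contains hi) = [] := by
        simp [pyCombinations]
      have h1 : (pyCombinations (lo :: (interior ++ [hi])) 1).filter
          (fun s => s.contains lo && s.contains hi) = [] := by
        rw [pyCombinations_one]
        apply List.filter_eq_nil_iff.mpr
        intro s hs
        simp only [List.mem_map] at hs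
        obtain ⟨x, _, rfl⟩ := hs
        simp only [List.contains_cons, List.contains_nil, Bool.or_false]
        intro h
        simp only [Bool.and_eq_true, beq_iff_eq] at h
        omega
      rw [h0, h1, List.nil_append, List.nil_append]
      apply List.flatMap_congr
      intro L _
      show (pyCombinations (lo :: (interior ++ [hi])) (L + 2)).filter
          (fun s => s.contains lo && s.contains hi)
        = (pyCombinations interior L).map (fun mid => lo :: (mid ++ [hi]))
      rw [pyCombinations_filter_cons lo hi (interior ++ [hi]) hlomem (by omega) L,
        pyCombinations_filter_last hi interior hhimem L, List.map_map]
      rfl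
  rw [hcombos, PySem.List.foldl_append_singleton_eq_map, List.nil_append]
  apply List.map_congr_left
  intro combo hcombo
  -- every combo in the DP's list is strictly ascending
  have hpw : combo.Pairwise (· < ·) := by
    by_cases heq : lo = hi
    · subst heq
      simp only [BEq.rfl, if_true, List.mem_singleton] at hcombo
      subst hcombo; simp
    · have hlt : lo < hi := lt_of_le_of_ne hlohi heq
      simp only [beq_iff_eq, heq, if_false, hdp, List.flatMap_map, List.mem_flatMap,
        List.mem_map] at hcombo
      obtain ⟨L, _, mid, hmid, rfl⟩ := hcombo
      exact combo_pairwise lo hi hlt mid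
        (pyCombinations_sublist _ L mid hmid)
  have htimes : (PySem.List.pyRange min_time (min_time + (combo.length : Int)) 1).Pairwise
      (· < ·) := PySem.List.pairwise_lt_pyRange_one _ _
  congr 1
  · cases tasc with
    | true => rfl
    | false =>
      simp only [Bool.false_eq_true, if_false]
      rw [sorted_rev_eq_reverse_of_lt _ htimes, PySem.List.pyRange_neg_one_eq_reverse]
      congr 2 <;> ring
  · rw [sorted_eq_self_of_lt combo hpw]
    cases aasc with
    | true => rfl
    | false =>
      simp only [Bool.false_eq_true, if_false]
      exact sorted_rev_eq_reverse_of_lt combo hpw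

-- ===== VERDICT (by name: the statement is the Claim_ definition above) =====
theorem gen_combinations_spec : Claim_equal_gen_combinations := by
  intro attribute_values times _ hpre
  exact gen_combinations_eq attribute_values times hpre
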